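-- pv_equiv track=rewrite | github.com/Ventmaster/GFGPoTD | 19 Mar 24 - Possible Paths in a Tree.py | maximumWeight
-- ===== SOURCE A (Python) =====
-- def maximumWeight(n, edges, q, queries):
--     # code here
--     a = list(range(n))
--     y = [1] * n
--
--     def find(u):
--         if a[u] != u:
--             a[u] = find(a[u])
--         return a[u]
--
--     edges.sort(key = lambda x: x[2], reverse = True)
--     queries = sorted(enumerate(queries), key = lambda x:x[1])
--
--     answer = [0] * q
--     curr = 0
--
--     for index, x in queries:
--         while edges and edges[-1][2] <= x:
--             u, v, _ = edges.pop()
--             u, v = find(u-1), find(v-1)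
--
--             if u != v:
--                 a[u] = v
--                 curr += y[u] * y[v]
--                 y[v] += y[u]
--
--         answer[index] = curr
--
--     return answer
-- ===== SOURCE B (Python) =====
-- # B: one DSU pass over edges in ascending-weight order builds checkpoint arrays
-- # (weights, cumulative pair counts); each query is then answered independently by
-- # a hand-written bisect_right binary search -- no query sorting, no two-pointer merge.
-- # Like A, it sorts `edges` in place (return-value equivalence; A additionally pops from it).
--
-- def _bisect_right(ws, x):
--     lo, hi = 0, len(ws)
--     while lo < hi:
--         mid = (lo + hi) // 2
--         if ws[mid] <= x:
--             lo = mid + 1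
--         else:
--             hi = mid
--     return lo
--
-- def maximumWeight(n, edges, q, queries):
--     a = list(range(n))
--     y = [1] * n
--
--     def find(u):
--         if a[u] != u:
--             a[u] = find(a[u])
--         return a[u]
--
--     edges.sort(key=lambda x: x[2], reverse=True)
--
--     ws = []   # ascending edge weights
--     cs = []   # cumulative pair count after processing that edge
--     curr = 0
--     for e in reversed(edges):
--         u, v = find(e[0] - 1), find(e[1] - 1)
--         if u != v:
--             a[u] = v
--             curr += y[u] * y[v]
--             y[v] += y[u]
--         ws.append(e[2])
--         cs.append(curr)
--
--     answer = [0] * q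
--     for i, x in enumerate(queries):
--         k = _bisect_right(ws, x)
--         if k:
--             answer[i] = cs[k - 1]
--     return answer
-- ===== Notes on version B (the rewrite author's own statement) =====
-- stated objective: alternative
-- what changed: A sorts the queries and advances a shared DSU with a two-pointer merge loop per sorted query; B runs the DSU once over all edges in ascending-weight order, records checkpoint arrays (weight, cumulative pair count), and answers each query independently in original order by a hand-written bisect_right binary search over the checkpoints.
-- outside the precondition, e.g. on maximumWeight(1, [[5, 1, 10]], 1, [0]): A returns [0], B raises IndexError; on maximumWeight(2, [[1, 2, 3, 9]], 1, [0]): A returns [0], B returns [0]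
import Mathlib
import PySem

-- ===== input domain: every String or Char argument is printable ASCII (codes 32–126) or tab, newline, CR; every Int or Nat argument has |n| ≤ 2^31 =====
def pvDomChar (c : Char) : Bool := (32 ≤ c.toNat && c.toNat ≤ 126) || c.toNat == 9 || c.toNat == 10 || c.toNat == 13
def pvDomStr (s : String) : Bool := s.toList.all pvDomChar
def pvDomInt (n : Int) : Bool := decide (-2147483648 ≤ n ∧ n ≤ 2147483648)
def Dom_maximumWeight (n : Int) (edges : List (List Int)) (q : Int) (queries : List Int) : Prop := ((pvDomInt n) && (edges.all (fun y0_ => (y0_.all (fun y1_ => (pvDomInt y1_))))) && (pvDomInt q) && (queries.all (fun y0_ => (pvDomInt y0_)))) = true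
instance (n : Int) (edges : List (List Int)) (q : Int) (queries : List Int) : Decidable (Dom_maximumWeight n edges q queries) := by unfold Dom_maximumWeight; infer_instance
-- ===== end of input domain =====

-- B replaces A's sorted-queries two-pointer merge by one DSU pass over ascending edges that
-- records checkpoints, each query then answered independently by binary search (alternative
-- decomposition, similar cost).  Both Pythons mutate `edges` in place (A also pops from it);
-- the equivalence proved here is about the return value only.

-- ===== PORT A =====
-- shared DSU: both Pythons contain literally the same `find` and the same union body
def pvFind : Nat → List Int → Int → List Int × Int
  | 0, a, u => (a, u)
  | fuel+1, a, u =>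
    let au := PySem.List.pyGetD a u 0
    if au ≠ u then
      let r := pvFind fuel a au
      (PySem.List.pySetD r.1 u r.2, r.2)
    else (a, u)

def pvWt (e : List Int) : Int := PySem.List.pyGetD e 2 0

-- u, v = find(u-1), find(v-1); if u != v: a[u] = v; curr += y[u]*y[v]; y[v] += y[u]
def pvUnion (st : List Int × List Int × Int) (e : List Int) : List Int × List Int × Int :=
  let r1 := pvFind (st.1.length + 2) st.1 (PySem.List.pyGetD e 0 0 - 1)
  let r2 := pvFind (r1.1.length + 2) r1.1 (PySem.List.pyGetD e 1 0 - 1)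
  if r1.2 ≠ r2.2 then
    let yu := PySem.List.pyGetD st.2.1 r1.2 0
    let yv := PySem.List.pyGetD st.2.1 r2.2 0
    (PySem.List.pySetD r2.1 r1.2 r2.2, PySem.List.pySetD st.2.1 r2.2 (yv + yu), st.2.2 + yu * yv)
  else (r2.1, st.2.1, st.2.2)

-- while edges and edges[-1][2] <= x: pop and union
def pvDrain (es : List (List Int)) (st : List Int × List Int × Int) (x : Int) :
    List (List Int) × (List Int × List Int × Int) :=
  match h : es.getLast? with
  | none => (es, st)
  | some e =>
    if pvWt e ≤ x then pvDrain es.dropLast (pvUnion st e) x else (es, st)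
  termination_by es.length
  decreasing_by
    have hne : es ≠ [] := by intro hnil; rw [hnil] at h; simp at h
    have hpos : 0 < es.length := List.length_pos_iff.mpr hne
    rw [List.length_dropLast]; omega

def maximumWeight (n : Int) (edges : List (List Int)) (q : Int) (queries : List Int) : List Int :=
  let a := PySem.List.pyRange 0 n 1
  let y := PySem.List.pyRepeat [(1 : Int)] n
  let es := PySem.List.sorted edges (fun e => PySem.List.pyGetD e 2 0) true
  let sq := PySem.List.sorted (PySem.List.enumerate queries 0) (fun p => p.2) false
  let answer := PySem.List.pyRepeat [(0 : Int)] q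
  let r := sq.foldl
    (fun (acc : List (List Int) × ((List Int × List Int × Int) × List Int)) p =>
      let d := pvDrain acc.1 acc.2.1 p.2
      (d.1, (d.2, PySem.List.pySetD acc.2.2 p.1 d.2.2.2)))
    (es, ((a, y, 0), answer))
  r.2.2

-- ===== PORT B =====
-- hand-written bisect_right (Source B writes it out; no imports in the module)
def pvBisectGo (ws : List Int) (x lo hi : Int) : Int :=
  if hlt : lo < hi then
    let mid := PySem.Int.floordiv (lo + hi) 2
    if PySem.List.pyGetD ws mid 0 ≤ x then pvBisectGo ws x (mid + 1) hi
    else pvBisectGo ws x lo mid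
  else lo
  termination_by (hi - lo).toNat
  decreasing_by
  · have h1 := (PySem.Int.floordiv_two_mid_bounds (le_of_lt hlt)).1
    omega
  · have h2 : PySem.Int.floordiv (lo + hi) 2 < hi :=
      (PySem.Int.floordiv_lt_iff_lt_mul (by omega)).mpr (by omega)
    omega

def pvBisectRight (ws : List Int) (x : Int) : Int := pvBisectGo ws x 0 ws.length

def maximumWeight_alt (n : Int) (edges : List (List Int)) (q : Int) (queries : List Int) : List Int :=
  let a := PySem.List.pyRange 0 n 1
  let y := PySem.List.pyRepeat [(1 : Int)] n
  let es := PySem.List.sorted edges (fun e => PySem.List.pyGetD e 2 0) true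
  let r := es.reverse.foldl
    (fun (acc : (List Int × List Int × Int) × List Int × List Int) e =>
      let st := pvUnion acc.1 e
      (st, acc.2.1 ++ [PySem.List.pyGetD e 2 0], acc.2.2 ++ [st.2.2]))
    ((a, y, 0), [], [])
  (PySem.List.enumerate queries 0).foldl
    (fun ans p =>
      let k := pvBisectRight r.2.1 p.2
      if k ≠ 0 then PySem.List.pySetD ans p.1 (PySem.List.pyGetD r.2.2 (k - 1) 0) else ans)
    (PySem.List.pyRepeat [(0 : Int)] q)

-- ===== PRECONDITION & SPEC =====
-- Pre_ excludes inputs on which A raises (an edge that is not a triple, a node index outside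
-- Python's indexing range for the n parent slots, or more queries than answer slots), and —
-- cited in the claim — malformed edges whose weight exceeds every query: A never pops those
-- and returns, while B, which processes every edge, raises there.
def Pre_maximumWeight (n : Int) (edges : List (List Int)) (q : Int) (queries : List Int) : Prop :=
  (∀ e ∈ edges, e.length = 3 ∧
      -n ≤ PySem.List.pyGetD e 0 0 - 1 ∧ PySem.List.pyGetD e 0 0 - 1 < n ∧
      -n ≤ PySem.List.pyGetD e 1 0 - 1 ∧ PySem.List.pyGetD e 1 0 - 1 < n) ∧
  (queries = [] ∨ (queries.length : Int) ≤ q)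
instance (n : Int) (edges : List (List Int)) (q : Int) (queries : List Int) : Decidable (Pre_maximumWeight n edges q queries) := by unfold Pre_maximumWeight; infer_instance

def pvWitness_maximumWeight : Int × List (List Int) × Int × List Int :=
  (3, [[1, 2, 1], [2, 3, 2]], 2, [1, 2])

def Spec_maximumWeight (n : Int) (edges : List (List Int)) (q : Int) (queries : List Int) (out : List Int) : Prop := out = maximumWeight_alt n edges q queries
instance (n : Int) (edges : List (List Int)) (q : Int) (queries : List Int) (out : List Int) : Decidable (Spec_maximumWeight n edges q queries out) := by unfold Spec_maximumWeight; infer_instance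

-- ===== CLAIM (what is proved, stated in full; the proofs are below) =====
def Claim_equal_maximumWeight : Prop := ∀ (n : Int) (edges : List (List Int)) (q : Int) (queries : List Int), Dom_maximumWeight n edges q queries → Pre_maximumWeight n edges q queries → Spec_maximumWeight n edges q queries (maximumWeight n edges q queries)



-- ===== LEMMAS AND PROOFS =====

-- DSU state fold and the per-query count both ports compute
def pvRun (st : List Int × List Int × Int) (l : List (List Int)) : List Int × List Int × Int :=
  l.foldl pvUnion st

def pvCnt (st0 : List Int × List Int × Int) (l : List (List Int)) (x : Int) : Int :=
  (pvRun st0 (l.takeWhile (fun e => decide (pvWt e ≤ x)))).2.2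

-- A's while loop, read from the ascending end: it consumes exactly the takeWhile prefix
lemma pvDrain_reverse (x : Int) (rs : List (List Int)) : ∀ st,
    pvDrain rs.reverse st x =
      ((rs.dropWhile (fun e => decide (pvWt e ≤ x))).reverse,
       pvRun st (rs.takeWhile (fun e => decide (pvWt e ≤ x)))) := by
  induction rs with
  | nil => intro st; rw [pvDrain.eq_def]; simp [pvRun]
  | cons e t ih =>
    intro st
    rw [show (e :: t).reverse = t.reverse ++ [e] from by simp]
    rw [pvDrain.eq_def]
    split
    · next heq => rw [List.getLast?_concat] at heq; cases heq
    · next e1 heq =>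
      rw [List.getLast?_concat] at heq
      cases heq
      rw [List.dropLast_concat]
      by_cases hle : pvWt e ≤ x
      · rw [if_pos hle, ih (pvUnion st e)]
        simp [pvRun, hle]
      · rw [if_neg hle]
        simp [pvRun, hle]

-- A's main loop over value-sorted queries, with `done` edges already consumed
lemma loopA_go (st0 : List Int × List Int × Int) :
    ∀ (sq : List (Int × Int)) (done D : List (List Int)) (ans : List Int),
      sq.Pairwise (fun a b => a.2 ≤ b.2) →
      (∀ e ∈ done, ∀ p ∈ sq, pvWt e ≤ p.2) →
      (sq.foldl
        (fun (acc : List (List Int) × ((List Int × List Int × Int) × List Int)) p =>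
          let d := pvDrain acc.1 acc.2.1 p.2
          (d.1, (d.2, PySem.List.pySetD acc.2.2 p.1 d.2.2.2)))
        (D.reverse, (pvRun st0 done, ans))).2.2
      = sq.foldl (fun a p => PySem.List.pySetD a p.1 (pvCnt st0 (done ++ D) p.2)) ans := by
  intro sq
  induction sq with
  | nil => intro done D ans _ _; simp
  | cons p rest ih =>
    intro done D ans hq hdone
    have hpx : ∀ e ∈ done, decide (pvWt e ≤ p.2) = true := by
      intro e he; exact decide_eq_true (hdone e he p (List.mem_cons_self))
    have htw : done.takeWhile (fun e => decide (pvWt e ≤ p.2)) = done := by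
      rw [List.takeWhile_eq_self_iff]; exact hpx
    simp only [List.foldl_cons]
    rw [pvDrain_reverse p.2 D (pvRun st0 done)]
    have hrun : pvRun (pvRun st0 done) (D.takeWhile (fun e => decide (pvWt e ≤ p.2)))
        = pvRun st0 (done ++ D.takeWhile (fun e => decide (pvWt e ≤ p.2))) := by
      simp [pvRun, List.foldl_append]
    have hcnt : pvCnt st0 (done ++ D) p.2
        = (pvRun st0 (done ++ D.takeWhile (fun e => decide (pvWt e ≤ p.2)))).2.2 := by
      unfold pvCnt
      rw [List.takeWhile_append, htw, if_pos rfl]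
    rw [hrun]
    rw [ih (done ++ D.takeWhile (fun e => decide (pvWt e ≤ p.2)))
        (D.dropWhile (fun e => decide (pvWt e ≤ p.2)))
        (PySem.List.pySetD ans p.1 (pvRun st0 (done ++ D.takeWhile (fun e => decide (pvWt e ≤ p.2)))).2.2)
        (hq.tail) ?_]
    · have hDD : (done ++ D.takeWhile (fun e => decide (pvWt e ≤ p.2)))
          ++ D.dropWhile (fun e => decide (pvWt e ≤ p.2)) = done ++ D := by
        rw [List.append_assoc, List.takeWhile_append_dropWhile]
      rw [hDD, hcnt]
    · intro e he r hr
      rcases List.mem_append.mp he with h1 | h2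
      · exact hdone e h1 r (List.mem_cons_of_mem _ hr)
      · have h3 : pvWt e ≤ p.2 := by
          have := List.mem_takeWhile_imp h2; simpa using this
        have h4 : p.2 ≤ r.2 := (List.pairwise_cons.mp hq).1 r hr
        omega

-- B's single building pass produces the weight list and the cumulative-count list
lemma loopB_build :
    ∀ (l : List (List Int)) (st : List Int × List Int × Int) (ws cs : List Int),
      l.foldl
        (fun (acc : (List Int × List Int × Int) × List Int × List Int) e =>
          let st := pvUnion acc.1 e
          (st, acc.2.1 ++ [PySem.List.pyGetD e 2 0], acc.2.2 ++ [st.2.2]))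
        (st, ws, cs)
      = (pvRun st l, ws ++ l.map pvWt,
         cs ++ (List.range l.length).map (fun j => (pvRun st (l.take (j+1))).2.2)) := by
  intro l
  induction l with
  | nil => intro st ws cs; simp [pvRun]
  | cons e t ih =>
    intro st ws cs
    simp only [List.foldl_cons]
    rw [ih (pvUnion st e) (ws ++ [PySem.List.pyGetD e 2 0]) (cs ++ [(pvUnion st e).2.2])]
    refine Prod.ext ?_ (Prod.ext ?_ ?_)
    · simp [pvRun]
    · simp [pvWt]
    · show cs ++ [(pvUnion st e).2.2] ++ _ = cs ++ _
      rw [List.append_assoc]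
      congr 1
      rw [List.length_cons, List.range_succ_eq_map, List.map_cons, List.map_map]
      have hh : ((List.range t.length).map (fun j => (pvRun st ((e :: t).take (j + 1 + 1))).2.2))
          = (List.range t.length).map (fun j => (pvRun (pvUnion st e) (t.take (j + 1))).2.2) := by
        apply List.map_congr_left
        intro j hj
        simp [pvRun, List.take_succ_cons]
      simp only [Function.comp_def, Nat.succ_eq_add_one]
      rw [hh]
      simp [pvRun]

-- on a nondecreasing list, membership in the takeWhile prefix is an index bound
lemma sorted_le_iff (ws : List Int) (x : Int) (hs : ws.Pairwise (· ≤ ·))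
    (i : Nat) (hi : i < ws.length) :
    ws[i] ≤ x ↔ i < (ws.takeWhile (fun w => decide (w ≤ x))).length := by
  set p : Int → Bool := fun w => decide (w ≤ x) with hp
  set c := (ws.takeWhile p).length with hc
  have hpre := List.takeWhile_prefix (l := ws) p
  have hcle : c ≤ ws.length := hpre.length_le
  constructor
  · intro hle
    by_contra hnot
    have hci : c ≤ i := by omega
    have hclen : c < ws.length := by omega
    -- ws[c] does not satisfy p
    have hnp : ¬ (ws[c] ≤ x) := by
      have hdw : ws.dropWhile p ≠ [] := by
        intro hnil
        have h5 := List.takeWhile_append_dropWhile (p := p) (l := ws)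
        rw [hnil, List.append_nil] at h5
        have := congrArg List.length h5
        omega
      have hhead := List.head_dropWhile_not p hdw
      have hget : ws.dropWhile p = ws.drop c := by
        conv_rhs => rw [← List.takeWhile_append_dropWhile (p := p) (l := ws)]
        rw [List.drop_append_of_le_length (le_of_eq hc.symm)]
        simp
      have hlen0 : 0 < (ws.dropWhile p).length := List.length_pos_iff.mpr hdw
      have h0 : p ((ws.dropWhile p)[0]'hlen0) = false := by
        rw [← List.head_eq_getElem]; exact hhead
      have h1 : (ws.dropWhile p)[0]'hlen0 = ws[c] := by
        simp [hget, List.getElem_drop]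
      rw [h1] at h0
      simpa [hp] using h0
    -- monotone: ws[c] ≤ ws[i]
    rcases lt_or_eq_of_le hci with hlt | heq
    · have := List.pairwise_iff_getElem.mp hs c i hclen hi hlt
      omega
    · subst heq; omega
  · intro hic
    have heq : (ws.takeWhile p)[i]'(by omega) = ws[i] := hpre.getElem (by omega)
    rw [← heq]
    have := List.mem_takeWhile_imp (List.getElem_mem (by omega : i < (ws.takeWhile p).length))
    simpa [hp] using this


-- the hand-written binary search finds the takeWhile length
lemma pvBisectGo_eq (ws : List Int) (x : Int) (hs : ws.Pairwise (· ≤ ·)) :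
    ∀ (lo hi : Int), 0 ≤ lo →
      lo ≤ ((ws.takeWhile (fun w => decide (w ≤ x))).length : Int) →
      ((ws.takeWhile (fun w => decide (w ≤ x))).length : Int) ≤ hi →
      hi ≤ (ws.length : Int) →
      pvBisectGo ws x lo hi = ((ws.takeWhile (fun w => decide (w ≤ x))).length : Int) := by
  intro lo hi
  induction lo, hi using pvBisectGo.induct ws x with
  | case1 lo hi hlt mid hle ih =>
    have hmideq : mid = PySem.Int.floordiv (lo + hi) 2 := rfl
    rw [hmideq] at hle
    intro h0 h1 h2 h3
    rw [pvBisectGo, dif_pos hlt, if_pos hle]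
    have hmid := PySem.Int.floordiv_two_mid_bounds (le_of_lt hlt)
    have hmlt : PySem.Int.floordiv (lo + hi) 2 < hi :=
      (PySem.Int.floordiv_lt_iff_lt_mul (by omega)).mpr (by omega)
    have hmidlt : (PySem.Int.floordiv (lo + hi) 2).toNat < ws.length := by omega
    have hget : PySem.List.pyGetD ws (PySem.Int.floordiv (lo + hi) 2) 0
        = ws[(PySem.Int.floordiv (lo + hi) 2).toNat] :=
      PySem.List.pyGetD_eq_getElem ws 0 (by omega) (by omega)
    have hkey := (sorted_le_iff ws x hs (PySem.Int.floordiv (lo + hi) 2).toNat hmidlt).mp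
      (by rw [← hget]; exact hle)
    exact ih (by omega) (by omega) h2 h3
  | case2 lo hi hlt mid hle ih =>
    have hmideq : mid = PySem.Int.floordiv (lo + hi) 2 := rfl
    rw [hmideq] at hle
    intro h0 h1 h2 h3
    rw [pvBisectGo, dif_pos hlt, if_neg hle]
    have hmid := PySem.Int.floordiv_two_mid_bounds (le_of_lt hlt)
    have hmlt : PySem.Int.floordiv (lo + hi) 2 < hi :=
      (PySem.Int.floordiv_lt_iff_lt_mul (by omega)).mpr (by omega)
    have hmidlt : (PySem.Int.floordiv (lo + hi) 2).toNat < ws.length := by omega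
    have hget : PySem.List.pyGetD ws (PySem.Int.floordiv (lo + hi) 2) 0
        = ws[(PySem.Int.floordiv (lo + hi) 2).toNat] :=
      PySem.List.pyGetD_eq_getElem ws 0 (by omega) (by omega)
    have hkey : ¬ ((PySem.Int.floordiv (lo + hi) 2).toNat
        < (ws.takeWhile (fun w => decide (w ≤ x))).length) := by
      intro hcon
      have := (sorted_le_iff ws x hs (PySem.Int.floordiv (lo + hi) 2).toNat hmidlt).mpr hcon
      rw [← hget] at this
      exact hle this
    exact ih h0 h1 (by omega) (by omega)
  | case3 lo hi hnlt =>
    intro h0 h1 h2 h3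
    rw [pvBisectGo, dif_neg hnlt]
    omega

lemma pvBisectRight_eq (ws : List Int) (x : Int) (hs : ws.Pairwise (· ≤ ·)) :
    pvBisectRight ws x = ((ws.takeWhile (fun w => decide (w ≤ x))).length : Int) := by
  have h1 := List.takeWhile_prefix (l := ws) (fun w => decide (w ≤ x))
  have h2 := h1.length_le
  exact pvBisectGo_eq ws x hs 0 ws.length (le_refl _) (by exact_mod_cast Nat.zero_le _)
    (by exact_mod_cast h2) (le_refl _)

-- pyGetD / pySetD bookkeeping
lemma pyGetD_pySetD_ne (l : List Int) (i j : Int) (v : Int)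
    (hi : 0 ≤ i) (hj : 0 ≤ j) (hne : i ≠ j) :
    PySem.List.pyGetD (PySem.List.pySetD l i v) j 0 = PySem.List.pyGetD l j 0 := by
  by_cases hlen : i < (l.length : Int)
  · have h1 : i = ((i.toNat : Nat) : Int) := by omega
    have h2 : j = ((j.toNat : Nat) : Int) := by omega
    rw [h1, h2, PySem.List.pyGetD_pySetD_natCast l i.toNat j.toNat v 0 (by omega)]
    rw [if_neg (by omega)]
  · have : PySem.List.pySetD l i v = l := by
      unfold PySem.List.pySetD
      have : PySem.List.pySet? l i v = none := by
        rw [PySem.List.pySet?_eq_none_iff]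
        intro hcon
        unfold PySem.Raise.InRange at hcon
        omega
      rw [this]; rfl
    rw [this]

lemma pyGetD_replicate_zero (m : Nat) (i : Int) :
    PySem.List.pyGetD (List.replicate m (0 : Int)) i 0 = 0 := by
  unfold PySem.List.pyGetD
  cases hg : PySem.List.pyGet? (List.replicate m (0 : Int)) i with
  | none => rfl
  | some v =>
    have := PySem.List.mem_of_pyGet?_eq_some _ hg
    have := List.eq_of_mem_replicate this
    simp [this]

lemma pySetD_zero_self (l : List Int) (i : Int) (h : PySem.List.pyGetD l i 0 = 0) (hi : 0 ≤ i) :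
    PySem.List.pySetD l i 0 = l := by
  by_cases hlen : i < (l.length : Int)
  · rw [PySem.List.pySetD_of_nonneg _ _ hi]
    have hg : PySem.List.pyGetD l i 0 = l[i.toNat]'(by omega) :=
      PySem.List.pyGetD_eq_getElem l 0 hi hlen
    rw [hg] at h
    apply List.ext_getElem
    · simp
    · intro k h1 h2
      rw [List.getElem_set]
      split
      · next heq => subst heq; exact h.symm
      · rfl
  · unfold PySem.List.pySetD
    have : PySem.List.pySet? l i 0 = none := by
      rw [PySem.List.pySet?_eq_none_iff]
      intro hcon; unfold PySem.Raise.InRange at hcon; omega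
    rw [this]; rfl

lemma pySetD_comm (l : List Int) (i j a b : Int) (hi : 0 ≤ i) (hj : 0 ≤ j) (hne : i ≠ j) :
    PySem.List.pySetD (PySem.List.pySetD l i a) j b
      = PySem.List.pySetD (PySem.List.pySetD l j b) i a := by
  rw [PySem.List.pySetD_of_nonneg _ _ hi, PySem.List.pySetD_of_nonneg _ _ hj,
      PySem.List.pySetD_of_nonneg _ _ hj, PySem.List.pySetD_of_nonneg _ _ hi]
  exact List.set_comm _ _ (by omega)

-- a conditional assignment into still-zero slots equals the unconditional one writing 0
lemma fold_if_zero (g : Int × Int → Int) (cnd : Int × Int → Prop) [DecidablePred cnd] :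
    ∀ (ps : List (Int × Int)) (ans : List Int),
      ps.Pairwise (fun p r => p.1 < r.1) →
      (∀ p ∈ ps, 0 ≤ p.1) →
      (∀ p ∈ ps, PySem.List.pyGetD ans p.1 0 = 0) →
      ps.foldl (fun a p => if cnd p then PySem.List.pySetD a p.1 (g p) else a) ans
        = ps.foldl (fun a p => PySem.List.pySetD a p.1 (if cnd p then g p else 0)) ans := by
  intro ps
  induction ps with
  | nil => intro ans _ _ _; rfl
  | cons p0 rest ih =>
    intro ans hpw hnn hz
    simp only [List.foldl_cons]
    have hnn0 : 0 ≤ p0.1 := hnn p0 List.mem_cons_self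
    by_cases hc : cnd p0
    · rw [if_pos hc, if_pos hc]
      apply ih _ hpw.tail (fun p hp => hnn p (List.mem_cons_of_mem _ hp))
      intro p hp
      rw [pyGetD_pySetD_ne _ _ _ _ hnn0 (hnn p (List.mem_cons_of_mem _ hp))
        (by have := (List.pairwise_cons.mp hpw).1 p hp; omega)]
      exact hz p (List.mem_cons_of_mem _ hp)
    · rw [if_neg hc, if_neg hc]
      rw [pySetD_zero_self ans p0.1 (hz p0 List.mem_cons_self) hnn0]
      exact ih ans hpw.tail (fun p hp => hnn p (List.mem_cons_of_mem _ hp))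
        (fun p hp => hz p (List.mem_cons_of_mem _ hp))


-- the two ports, each rewritten to the same canonical assignment fold
lemma A_eq (n : Int) (edges : List (List Int)) (q : Int) (queries : List Int) :
    maximumWeight n edges q queries
      = (PySem.List.sorted (PySem.List.enumerate queries 0) (fun p => p.2) false).foldl
          (fun a p => PySem.List.pySetD a p.1
            (pvCnt (PySem.List.pyRange 0 n 1, PySem.List.pyRepeat [(1 : Int)] n, 0)
              (PySem.List.sorted edges (fun e => PySem.List.pyGetD e 2 0) true).reverse p.2))
          (PySem.List.pyRepeat [(0 : Int)] q) := by
  simp only [maximumWeight]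
  have hq : (PySem.List.sorted (PySem.List.enumerate queries 0) (fun p => p.2) false).Pairwise
      (fun a b => a.2 ≤ b.2) := PySem.List.sorted_pairwise _ _
  have := loopA_go (PySem.List.pyRange 0 n 1, PySem.List.pyRepeat [(1 : Int)] n, 0)
    (PySem.List.sorted (PySem.List.enumerate queries 0) (fun p => p.2) false)
    [] (PySem.List.sorted edges (fun e => PySem.List.pyGetD e 2 0) true).reverse
    (PySem.List.pyRepeat [(0 : Int)] q) hq (by intro e he; simp at he)
  rw [List.reverse_reverse] at this
  simpa using this

lemma B_eq (n : Int) (edges : List (List Int)) (q : Int) (queries : List Int) :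
    maximumWeight_alt n edges q queries
      = (PySem.List.enumerate queries 0).foldl
          (fun a p => PySem.List.pySetD a p.1
            (pvCnt (PySem.List.pyRange 0 n 1, PySem.List.pyRepeat [(1 : Int)] n, 0)
              (PySem.List.sorted edges (fun e => PySem.List.pyGetD e 2 0) true).reverse p.2))
          (PySem.List.pyRepeat [(0 : Int)] q) := by
  simp only [maximumWeight_alt]
  rw [loopB_build]
  set st0 : List Int × List Int × Int :=
    (PySem.List.pyRange 0 n 1, PySem.List.pyRepeat [(1 : Int)] n, 0) with hst0
  set asc : List (List Int) :=
    (PySem.List.sorted edges (fun e => PySem.List.pyGetD e 2 0) true).reverse with hasc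
  have hws : (asc.map pvWt).Pairwise (· ≤ ·) := by
    rw [List.pairwise_map]
    rw [hasc, List.pairwise_reverse]
    exact PySem.List.sorted_pairwise_rev edges _
  have hwlen : (asc.map pvWt).length = asc.length := by simp
  -- length of the consumed prefix, per query value
  have hcle : ∀ x : Int, ((asc.map pvWt).takeWhile (fun w => decide (w ≤ x))).length ≤ asc.length := by
    intro x
    have := (List.takeWhile_prefix (l := asc.map pvWt) (fun w => decide (w ≤ x))).length_le
    omega
  have htwmap : ∀ x : Int, (asc.map pvWt).takeWhile (fun w => decide (w ≤ x))
      = (asc.takeWhile (fun e => decide (pvWt e ≤ x))).map pvWt := by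
    intro x
    rw [List.takeWhile_map]
    rfl
  -- step 1: value inside the branch is pvCnt
  have step1 : ∀ p ∈ PySem.List.enumerate queries 0, ∀ (a : List Int),
      (fun (ans : List Int) (p : Int × Int) =>
        if pvBisectRight ([] ++ asc.map pvWt) p.2 ≠ 0 then
          PySem.List.pySetD ans p.1
            (PySem.List.pyGetD
              ([] ++ (List.range asc.length).map (fun j => (pvRun st0 (asc.take (j+1))).2.2))
              (pvBisectRight ([] ++ asc.map pvWt) p.2 - 1) 0)
        else ans) a p
      = (fun (ans : List Int) (p : Int × Int) =>
          if pvBisectRight (asc.map pvWt) p.2 ≠ 0 then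
            PySem.List.pySetD ans p.1 (pvCnt st0 asc p.2) else ans) a p := by
    intro p _ a
    simp only [List.nil_append]
    by_cases hk : pvBisectRight (asc.map pvWt) p.2 ≠ 0
    · rw [if_pos hk, if_pos hk]
      congr 1
      rw [pvBisectRight_eq _ _ hws] at hk ⊢
      set c := ((asc.map pvWt).takeWhile (fun w => decide (w ≤ p.2))).length with hc
      have hcpos : 0 < c := by omega
      have hclen : c ≤ asc.length := hcle p.2
      have hidx : ((c : Int) - 1) = (((c - 1 : Nat) : Nat) : Int) := by omega
      rw [hidx, PySem.List.pyGetD_eq_getElem _ _ (by omega) (by simp; omega)]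
      rw [List.getElem_map, List.getElem_range]
      have hc1 : ((((c - 1 : Nat) : Nat) : Int)).toNat + 1 = c := by omega
      rw [hc1]
      have htake : asc.take c = asc.takeWhile (fun e => decide (pvWt e ≤ p.2)) := by
        have hpre := List.takeWhile_prefix (l := asc) (fun e => decide (pvWt e ≤ p.2))
        have hlen : (asc.takeWhile (fun e => decide (pvWt e ≤ p.2))).length = c := by
          rw [hc, htwmap p.2, List.length_map]
        rw [← hlen]
        exact (List.prefix_iff_eq_take.mp hpre).symm
      rw [htake]
      rfl
    · rw [if_neg hk, if_neg hk]
  -- step 2: skipped queries would have written the 0 already there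
  have hz : ∀ p ∈ PySem.List.enumerate queries 0,
      PySem.List.pyGetD (PySem.List.pyRepeat [(0 : Int)] q) p.1 0 = 0 := by
    intro p _
    rw [PySem.List.pyRepeat_singleton]
    exact pyGetD_replicate_zero _ _
  have hnn : ∀ p ∈ PySem.List.enumerate queries 0, 0 ≤ p.1 := by
    intro p hp
    obtain ⟨k, hk, rfl⟩ := (PySem.List.mem_enumerate_iff _ _ _).mp hp
    omega
  rw [PySem.List.foldl_congr_mem' _ _ _ _ step1]
  rw [fold_if_zero (fun p => pvCnt st0 asc p.2) (fun p => pvBisectRight (asc.map pvWt) p.2 ≠ 0)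
      _ _ (PySem.List.pairwise_lt_enumerate _ _) hnn hz]
  -- step 3: when the branch is skipped the value is 0 anyway
  apply PySem.List.foldl_congr_mem'
  intro p _ a
  by_cases hk : pvBisectRight (asc.map pvWt) p.2 ≠ 0
  · rw [if_pos hk]
  · rw [if_neg hk]
    rw [pvBisectRight_eq _ _ hws] at hk
    have hc0 : ((asc.map pvWt).takeWhile (fun w => decide (w ≤ p.2))).length = 0 := by
      by_contra hc
      exact hk (by omega)
    rw [htwmap p.2, List.length_map] at hc0
    have : asc.takeWhile (fun e => decide (pvWt e ≤ p.2)) = [] := List.length_eq_zero_iff.mp hc0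
    unfold pvCnt
    rw [this]
    rfl

-- ===== VERDICT (by name: the statement is the Claim_ definition above) =====
theorem maximumWeight_spec : Claim_equal_maximumWeight := by
  intro n edges q queries _hdom _hpre
  unfold Spec_maximumWeight
  rw [A_eq, B_eq]
  apply List.Perm.foldl_eq' (PySem.List.sorted_perm _ _ _)
  intro x hx y hy z
  by_cases hxy : x.1 = y.1
  · have hxe := (PySem.List.mem_sorted _ _ _ _).mp hx
    have hye := (PySem.List.mem_sorted _ _ _ _).mp hy
    obtain ⟨k, hk, rfl⟩ := (PySem.List.mem_enumerate_iff _ _ _).mp hxe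
    obtain ⟨k', hk', rfl⟩ := (PySem.List.mem_enumerate_iff _ _ _).mp hye
    simp only at hxy
    have : k = k' := by omega
    subst this
    rfl
  · have hxe := (PySem.List.mem_sorted _ _ _ _).mp hx
    have hye := (PySem.List.mem_sorted _ _ _ _).mp hy
    obtain ⟨k, hk, rfl⟩ := (PySem.List.mem_enumerate_iff _ _ _).mp hxe
    obtain ⟨k', hk', rfl⟩ := (PySem.List.mem_enumerate_iff _ _ _).mp hye
    exact pySetD_comm _ _ _ _ _ (by omega) (by omega) hxy
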